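-- pv_equiv track=rewrite | github.com/zeruhur/cosmiccreatures | docs/convert.py | ignore_frontmatter
-- ===== SOURCE A (Python) =====
-- def ignore_frontmatter(lines):
--     start_index = -1
--     end_index = -1
--
--     for i, line in enumerate(lines):
--         if line.strip() == '---':
--             if start_index == -1:
--                 start_index = i
--             else:
--                 end_index = i
--                 break
--
--     if start_index != -1 and end_index != -1:
--         return lines[end_index + 1:]
--     else:
--         return lines
-- ===== SOURCE B (Python) =====
-- def _after_delim(xs):
--     """Consume lines up to and including the first '---' line; return the
--     remaining suffix as a list, or None if there is no delimiter."""
--     it = iter(xs)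
--     for line in it:
--         if line.strip() == '---':
--             return list(it)
--     return None
--
-- def ignore_frontmatter(lines):
--     rest = _after_delim(lines)
--     if rest is None:
--         return lines
--     body = _after_delim(rest)
--     return lines if body is None else body
-- ===== Notes on version B (the rewrite author's own statement) =====
-- stated objective: idiomatic
-- what changed: Replaces A's index-and-sentinel loop plus slice with two staged applications of a suffix-peeling helper that consumes an iterator through the first '---' and returns the remainder, so no indices or slicing arithmetic appear at all.
import Mathlib
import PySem

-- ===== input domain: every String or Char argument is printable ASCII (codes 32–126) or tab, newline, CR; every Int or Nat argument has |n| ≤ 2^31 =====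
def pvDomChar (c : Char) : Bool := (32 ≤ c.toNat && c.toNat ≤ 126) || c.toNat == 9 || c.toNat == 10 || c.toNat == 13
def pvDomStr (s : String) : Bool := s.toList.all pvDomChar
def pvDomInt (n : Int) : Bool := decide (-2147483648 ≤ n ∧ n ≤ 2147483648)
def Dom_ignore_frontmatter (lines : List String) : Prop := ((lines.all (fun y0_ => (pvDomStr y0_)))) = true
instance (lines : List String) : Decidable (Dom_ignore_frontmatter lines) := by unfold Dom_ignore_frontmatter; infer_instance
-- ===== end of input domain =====

-- B replaces A's index-and-sentinel loop + slice by two staged applications of a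
-- suffix-peeling helper (consume through the first '---', return the remainder):
-- no indices or slicing arithmetic at all (idiomatic).

-- ===== PORT A =====
-- A's for-loop: counter i, sentinels start_index s / end_index e, breaking once e is set
def igLoop (rest : List String) (i : Int) (s e : Int) : Int × Int :=
  match rest with
  | [] => (s, e)
  | l :: tl =>
    if PySem.Str.strip l = "---" then
      if s = -1 then igLoop tl (i + 1) i e
      else (s, i)  -- end_index = i; break
    else igLoop tl (i + 1) s e

def ignore_frontmatter (lines : List String) : List String :=
  let p := igLoop lines 0 (-1) (-1)
  if p.1 ≠ -1 ∧ p.2 ≠ -1 then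
    PySem.List.slice lines (some (p.2 + 1)) none
  else
    lines

-- ===== PORT B =====
-- Source B's _after_delim: consume lines up to and including the first '---',
-- return the remaining suffix, or none if there is no delimiter
def afterDelim (xs : List String) : Option (List String) :=
  match xs with
  | [] => none
  | l :: tl => if PySem.Str.strip l = "---" then some tl else afterDelim tl

def ignore_frontmatter_alt (lines : List String) : List String :=
  match afterDelim lines with
  | none => lines
  | some rest =>
    match afterDelim rest with
    | none => lines
    | some body => body

-- ===== PRECONDITION & SPEC =====
def Spec_ignore_frontmatter (lines : List String) (out : List String) : Prop := out = ignore_frontmatter_alt lines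
instance (lines : List String) (out : List String) : Decidable (Spec_ignore_frontmatter lines out) := by unfold Spec_ignore_frontmatter; infer_instance

-- ===== CLAIM =====
def Claim_equal_ignore_frontmatter : Prop := ∀ (lines : List String), Dom_ignore_frontmatter lines → Spec_ignore_frontmatter lines (ignore_frontmatter lines)

-- ===== LEMMAS AND PROOFS =====

-- phase 2 of A's loop (start_index = s ≠ -1 already set): either no further delimiter
-- (end stays -1), or the loop stops at some absolute index e with xs.drop (e-i+1) the
-- suffix B's second peel returns.
theorem igLoop_phase2 (xs : List String) (i s : Int) (hs : s ≠ -1) (hi : 0 ≤ i) :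
    (afterDelim xs = none → igLoop xs i s (-1) = (s, -1)) ∧
    (∀ r, afterDelim xs = some r →
      ∃ e, igLoop xs i s (-1) = (s, e) ∧ i ≤ e ∧ xs.drop (e - i + 1).toNat = r) := by
  induction xs generalizing i with
  | nil => simp [afterDelim, igLoop]
  | cons l tl ih =>
    by_cases hl : PySem.Str.strip l = "---"
    · refine ⟨by simp [afterDelim, hl], ?_⟩
      intro r hr
      simp [afterDelim, hl] at hr
      refine ⟨i, by simp [igLoop, hl, hs], le_refl i, ?_⟩
      have : (i - i + 1).toNat = 1 := by omega
      simp [hr]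
    · obtain ⟨h1, h2⟩ := ih (i + 1) (by omega)
      refine ⟨fun h => ?_, fun r hr => ?_⟩
      · simp [afterDelim, hl] at h
        simp [igLoop, hl, h1 h]
      · simp [afterDelim, hl] at hr
        obtain ⟨e, he, hle, hdrop⟩ := h2 r hr
        refine ⟨e, by simp [igLoop, hl, he], by omega, ?_⟩
        have hn : (e - i + 1).toNat = (e - (i + 1) + 1).toNat + 1 := by omega
        simp [hn, hdrop]

-- phase 1 (both sentinels -1): the loop's outcome, case-split along B's two peels.
theorem igLoop_phase1 (xs : List String) (i : Int) (hi : 0 ≤ i) :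
    (afterDelim xs = none → igLoop xs i (-1) (-1) = (-1, -1)) ∧
    (∀ r, afterDelim xs = some r →
      (afterDelim r = none → ∃ s, igLoop xs i (-1) (-1) = (s, -1)) ∧
      (∀ r2, afterDelim r = some r2 →
        ∃ s e, igLoop xs i (-1) (-1) = (s, e) ∧ 0 ≤ s ∧ i ≤ e ∧
          xs.drop (e - i + 1).toNat = r2)) := by
  induction xs generalizing i with
  | nil => simp [afterDelim, igLoop]
  | cons l tl ih =>
    by_cases hl : PySem.Str.strip l = "---"
    · refine ⟨by simp [afterDelim, hl], ?_⟩
      intro r hr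
      simp [afterDelim, hl] at hr
      subst hr
      have hsne : i ≠ -1 := by omega
      obtain ⟨p1, p2⟩ := igLoop_phase2 tl (i + 1) i hsne (by omega)
      refine ⟨fun h => ⟨i, ?_⟩, fun r2 hr2 => ?_⟩
      · simp [igLoop, hl, p1 h]
      · obtain ⟨e, he, hle, hdrop⟩ := p2 r2 hr2
        refine ⟨i, e, by simp [igLoop, hl, he], hi, by omega, ?_⟩
        have hn : (e - i + 1).toNat = (e - (i + 1) + 1).toNat + 1 := by omega
        simp [hn, hdrop]
    · obtain ⟨h1, h2⟩ := ih (i + 1) (by omega)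
      refine ⟨fun h => ?_, fun r hr => ?_⟩
      · simp [afterDelim, hl] at h
        simp [igLoop, hl, h1 h]
      · simp [afterDelim, hl] at hr
        obtain ⟨q1, q2⟩ := h2 r hr
        refine ⟨fun h => ?_, fun r2 hr2 => ?_⟩
        · obtain ⟨s, hs⟩ := q1 h
          exact ⟨s, by simp [igLoop, hl, hs]⟩
        · obtain ⟨s, e, he, hs0, hle, hdrop⟩ := q2 r2 hr2
          refine ⟨s, e, by simp [igLoop, hl, he], hs0, by omega, ?_⟩
          have hn : (e - i + 1).toNat = (e - (i + 1) + 1).toNat + 1 := by omega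
          simp [hn, hdrop]

theorem ignore_frontmatter_eq (lines : List String) :
    ignore_frontmatter lines = ignore_frontmatter_alt lines := by
  obtain ⟨h1, h2⟩ := igLoop_phase1 lines 0 (le_refl 0)
  unfold ignore_frontmatter ignore_frontmatter_alt
  cases hA : afterDelim lines with
  | none => simp [h1 hA]
  | some r =>
    obtain ⟨q1, q2⟩ := h2 r hA
    cases hB : afterDelim r with
    | none =>
      obtain ⟨s, hs⟩ := q1 hB
      simp [hs, hB]
    | some r2 =>
      obtain ⟨s, e, he, hs0, hle, hdrop⟩ := q2 r2 hB
      have hcond : s ≠ -1 ∧ e ≠ -1 := by omega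
      have hc : (e + 1) = (((e + 1).toNat : Nat) : Int) := by omega
      have hn : (e + 1).toNat = (e - 0 + 1).toNat := by omega
      simp only [he, hcond, ne_eq, not_false_iff, and_self, if_true, hB]
      rw [hc, PySem.List.slice_from_natCast, hn, hdrop]

-- ===== VERDICT =====
theorem ignore_frontmatter_spec : Claim_equal_ignore_frontmatter := by
  intro lines _
  exact ignore_frontmatter_eq lines
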